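-- pv_equiv track=rewrite | github.com/groowe/sudoku-mine | newstyle/level2.py | NT_chains
-- ===== SOURCE A (Python) =====
-- def NT_chains(nakedtwos = []):
--
--     chains = []
--     for c in range(len(nakedtwos)):
--         usedchain = [c]
--         cell = nakedtwos[c]
--         available = []
--         for c2 in range(len(nakedtwos)):
--             if c2 not in usedchain:
--                 ncell = nakedtwos[c2]
--                 com1 = (cell[0][0] in ncell[0])
--                 com2 = (cell[0][1] in ncell[0])
--                 com = ((com1 or com2))# and com1 != com2 )
--                 inrow = (cell[1] == ncell[1])
--                 incol = (cell[2] == ncell[2])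
--                 insqr = (cell[3] == ncell[3])
--                 relevant = ((inrow or incol or insqr) and com)
--                 if relevant:
--                     usedchain.append(c2)
--                     available.append([c2,com1,com2,inrow,incol,insqr])
--         chains.append(available)
--     return chains # [[[1, False, True, False, False, True]], [[0, True, False, False, False, True]],
-- ===== SOURCE B (Python) =====
-- def NT_chains(nakedtwos = []):
--     # Inverted indices: cell indices grouped by row, column and square,
--     # so each cell only examines cells that share a unit with it.
--     rows, cols, sqrs = {}, {}, {}
--     for i, cell in enumerate(nakedtwos):
--         rows.setdefault(cell[1], []).append(i)
--         cols.setdefault(cell[2], []).append(i)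
--         sqrs.setdefault(cell[3], []).append(i)
--     chains = []
--     for c, cell in enumerate(nakedtwos):
--         cand = set(rows[cell[1]] + cols[cell[2]] + sqrs[cell[3]])
--         cand.discard(c)
--         available = []
--         for c2 in sorted(cand):
--             ncell = nakedtwos[c2]
--             com1 = (cell[0][0] in ncell[0])
--             com2 = (cell[0][1] in ncell[0])
--             if com1 or com2:
--                 available.append([c2, com1, com2,
--                                   cell[1] == ncell[1],
--                                   cell[2] == ncell[2],
--                                   cell[3] == ncell[3]])
--         chains.append(available)
--     return chains
-- ===== Notes on version B (the rewrite author's own statement) =====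
-- stated objective: faster
-- what changed: Replaces the all-pairs inner scan (with its dead usedchain bookkeeping) by inverted indices keyed on row/column/square built in one pass; each cell then visits only the sorted deduplicated union of its three unit buckets.
import Mathlib
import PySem

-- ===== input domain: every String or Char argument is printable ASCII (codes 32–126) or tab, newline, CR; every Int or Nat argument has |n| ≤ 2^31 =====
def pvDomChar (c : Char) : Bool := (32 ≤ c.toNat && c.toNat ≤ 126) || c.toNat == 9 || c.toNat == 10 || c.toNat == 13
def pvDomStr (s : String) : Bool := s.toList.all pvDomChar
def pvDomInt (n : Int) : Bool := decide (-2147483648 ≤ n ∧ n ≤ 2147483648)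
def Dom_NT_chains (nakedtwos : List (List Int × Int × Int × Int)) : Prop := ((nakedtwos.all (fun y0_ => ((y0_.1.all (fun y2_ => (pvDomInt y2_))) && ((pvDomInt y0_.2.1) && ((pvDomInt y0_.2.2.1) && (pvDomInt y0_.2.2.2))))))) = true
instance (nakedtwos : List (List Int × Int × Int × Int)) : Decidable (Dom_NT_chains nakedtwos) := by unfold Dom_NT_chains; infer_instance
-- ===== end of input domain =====

-- B replaces the all-pairs scan with inverted row/col/square indices; header objective: faster on sparse unit sharing.
-- ===== PORT A =====
def pvCellD : List Int × Int × Int × Int := ([], 0, 0, 0)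

def NT_chains (nakedtwos : List (List Int × Int × Int × Int)) : List (List (Int × Bool × Bool × Bool × Bool × Bool)) :=
  (List.range nakedtwos.length).map (fun c =>
    let cell := nakedtwos.getD c pvCellD
    ((List.range nakedtwos.length).foldl
      (fun (st : List Int × List (Int × Bool × Bool × Bool × Bool × Bool)) (c2 : Nat) =>
        if st.1.contains ((c2 : Int)) then st
        else
          let ncell := nakedtwos.getD c2 pvCellD
          let com1 := ncell.1.contains (PySem.List.pyGetD cell.1 0 0)
          let com2 := ncell.1.contains (PySem.List.pyGetD cell.1 1 0)
          let com := com1 || com2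
          let inrow := cell.2.1 == ncell.2.1
          let incol := cell.2.2.1 == ncell.2.2.1
          let insqr := cell.2.2.2 == ncell.2.2.2
          let relevant := (inrow || incol || insqr) && com
          if relevant then
            (st.1 ++ [((c2 : Int))], st.2 ++ [(((c2 : Int)), com1, com2, inrow, incol, insqr)])
          else st)
      ([((c : Int))], [])).2)

-- ===== PORT B =====
def NT_chains_alt (nakedtwos : List (List Int × Int × Int × Int)) : List (List (Int × Bool × Bool × Bool × Bool × Bool)) :=
  let idx :=
    (PySem.List.enumerate nakedtwos).foldl
      (fun (st : PySem.Dict Int (List Int) × PySem.Dict Int (List Int) × PySem.Dict Int (List Int)) p =>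
        let i := p.1; let cell := p.2
        (st.1.modify cell.2.1 [] (· ++ [i]),
         st.2.1.modify cell.2.2.1 [] (· ++ [i]),
         st.2.2.modify cell.2.2.2 [] (· ++ [i])))
      (PySem.Dict.empty, PySem.Dict.empty, PySem.Dict.empty)
  (PySem.List.enumerate nakedtwos).map (fun p =>
    let c := p.1; let cell := p.2
    let cand := PySem.Set.discard
      (PySem.Set.ofList (idx.1.getD cell.2.1 [] ++ idx.2.1.getD cell.2.2.1 [] ++ idx.2.2.getD cell.2.2.2 []))
      c
    (PySem.List.sorted cand (fun x => x) false).foldl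
      (fun avail c2 =>
        let ncell := PySem.List.pyGetD nakedtwos c2 pvCellD
        let com1 := ncell.1.contains (PySem.List.pyGetD cell.1 0 0)
        let com2 := ncell.1.contains (PySem.List.pyGetD cell.1 1 0)
        if com1 || com2 then
          avail ++ [(c2, com1, com2, cell.2.1 == ncell.2.1, cell.2.2.1 == ncell.2.2.1, cell.2.2.2 == ncell.2.2.2)]
        else avail)
      [])

-- ===== PRECONDITION & SPEC =====
-- Pre_ excludes exactly the inputs on which A raises IndexError: with at least two cells,
-- some cell's candidate list has fewer than two entries (cell[0][0]/cell[0][1] fail).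
def Pre_NT_chains (nakedtwos : List (List Int × Int × Int × Int)) : Prop :=
  nakedtwos.length ≤ 1 ∨ ∀ cell ∈ nakedtwos, 2 ≤ cell.1.length
instance (nakedtwos : List (List Int × Int × Int × Int)) : Decidable (Pre_NT_chains nakedtwos) := by unfold Pre_NT_chains; infer_instance

def pvWitness_NT_chains : (List (List Int × Int × Int × Int)) :=
  [([1, 2], 0, 0, 0), ([2, 3], 0, 1, 0)]

def Spec_NT_chains (nakedtwos : List (List Int × Int × Int × Int)) (out : List (List (Int × Bool × Bool × Bool × Bool × Bool))) : Prop := out = NT_chains_alt nakedtwos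
instance (nakedtwos : List (List Int × Int × Int × Int)) (out : List (List (Int × Bool × Bool × Bool × Bool × Bool))) : Decidable (Spec_NT_chains nakedtwos out) := by
  unfold Spec_NT_chains
  letI h1 : DecidableEq (Int × Bool × Bool × Bool × Bool × Bool) := inferInstance
  letI h2 : DecidableEq (List (Int × Bool × Bool × Bool × Bool × Bool)) := @instDecidableEqList _ h1
  exact @instDecidableEqList _ h2 out (NT_chains_alt nakedtwos)

-- ===== CLAIM (what is proved, stated in full; the proofs are below) =====
def Claim_equal_NT_chains : Prop := ∀ (nakedtwos : List (List Int × Int × Int × Int)), Dom_NT_chains nakedtwos → Pre_NT_chains nakedtwos → Spec_NT_chains nakedtwos (NT_chains nakedtwos)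

-- ===== LEMMAS AND PROOFS =====

-- abbreviations for the proof (not used by the ports/claims)
def pvE : Type := Int × Bool × Bool × Bool × Bool × Bool
def pvCell : Type := List Int × Int × Int × Int

-- unit-sharing test, candidate-sharing test, and the emitted entry, as A/B both compute them
def pvU (cell ncell : pvCell) : Bool :=
  cell.2.1 == ncell.2.1 || cell.2.2.1 == ncell.2.2.1 || cell.2.2.2 == ncell.2.2.2

def pvC (cell ncell : pvCell) : Bool :=
  ncell.1.contains (PySem.List.pyGetD cell.1 0 0) || ncell.1.contains (PySem.List.pyGetD cell.1 1 0)

def pvT (cell ncell : pvCell) (i : Int) : pvE :=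
  (i, ncell.1.contains (PySem.List.pyGetD cell.1 0 0), ncell.1.contains (PySem.List.pyGetD cell.1 1 0),
   cell.2.1 == ncell.2.1, cell.2.2.1 == ncell.2.2.1, cell.2.2.2 == ncell.2.2.2)

-- A's inner-loop step, exactly as in the port
def pvAStep (xs : List pvCell) (cell : pvCell) (st : List Int × List pvE) (c2 : Nat) : List Int × List pvE :=
  if st.1.contains ((c2 : Int)) then st
  else
    if (pvU cell (xs.getD c2 pvCellD)) && (pvC cell (xs.getD c2 pvCellD)) then
      (st.1 ++ [((c2 : Int))], st.2 ++ [pvT cell (xs.getD c2 pvCellD) ((c2 : Int))])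
    else st

theorem pvA_eq (xs : List pvCell) : NT_chains xs =
    (List.range xs.length).map (fun c =>
      ((List.range xs.length).foldl (pvAStep xs (xs.getD c pvCellD)) ([((c : Int))], [])).2) := rfl

-- A's inner loop: the usedchain check only ever excludes c itself
theorem pvA_inner (xs : List pvCell) (cell : pvCell) (c : Nat) :
    ∀ (L : List Nat) (used : List Int) (acc : List pvE), L.Nodup →
      (∀ x ∈ L, used.contains ((x : Int)) = decide (x = c)) →
      (L.foldl (pvAStep xs cell) (used, acc)).2 =
        acc ++ (L.filter (fun c2 => !decide (c2 = c) && (pvU cell (xs.getD c2 pvCellD) && pvC cell (xs.getD c2 pvCellD)))).map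
          (fun c2 => pvT cell (xs.getD c2 pvCellD) ((c2 : Int))) := by
  intro L
  induction L with
  | nil => intro used acc _ _; simp
  | cons a L ih =>
    intro used acc hnd hused
    have ha := hused a (by simp)
    rcases List.nodup_cons.mp hnd with ⟨haL, hndL⟩
    by_cases hac : a = c
    · subst hac
      have ha' : used.contains ((a : Int)) = true := by rw [ha]; simp
      have hstep : pvAStep xs cell (used, acc) a = (used, acc) := by
        unfold pvAStep; rw [if_pos ha']
      rw [List.foldl_cons, hstep, ih used acc hndL (fun x hx => hused x (by simp [hx]))]
      simp
    · have ha' : used.contains ((a : Int)) = false := by rw [ha]; simp [hac]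
      by_cases hrel : (pvU cell (xs.getD a pvCellD) && pvC cell (xs.getD a pvCellD)) = true
      · have hstep : pvAStep xs cell (used, acc) a =
            (used ++ [((a : Int))], acc ++ [pvT cell (xs.getD a pvCellD) ((a : Int))]) := by
          unfold pvAStep; rw [if_neg (by rw [ha']; simp), if_pos hrel]
        rw [List.foldl_cons, hstep,
          ih (used ++ [((a : Int))]) (acc ++ [pvT cell (xs.getD a pvCellD) ((a : Int))]) hndL]
        · rw [Bool.and_eq_true] at hrel
          obtain ⟨hu1, hc1⟩ := hrel
          rw [List.filter_cons,
            if_pos (by rw [Bool.and_eq_true]; exact ⟨by simp [hac], by rw [Bool.and_eq_true]; exact ⟨hu1, hc1⟩⟩),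
            List.map_cons]
          simp
        · intro x hx
          have hxa : x ≠ a := fun h => haL (h ▸ hx)
          rw [List.contains_append, hused x (List.mem_cons_of_mem _ hx)]
          simp [hxa]
      · have hstep : pvAStep xs cell (used, acc) a = (used, acc) := by
          unfold pvAStep; rw [if_neg (by rw [ha']; simp), if_neg hrel]
        rw [List.foldl_cons, hstep, ih used acc hndL (fun x hx => hused x (by simp [hx]))]
        have hb : (pvU cell (xs.getD a pvCellD) && pvC cell (xs.getD a pvCellD)) = false := by
          rcases h1 : pvU cell (xs.getD a pvCellD) <;> rcases h2 : pvC cell (xs.getD a pvCellD) <;> simp_all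
        rw [List.filter_cons, if_neg (by rw [Bool.and_eq_true]; rintro ⟨-, h2⟩; rw [hb] at h2; cases h2)]

-- product-state fold splits into three independent folds
theorem pvFold3 {α β γ δ : Type} (g1 : α → δ → α) (g2 : β → δ → β) (g3 : γ → δ → γ) :
    ∀ (L : List δ) (s1 : α) (s2 : β) (s3 : γ),
      L.foldl (fun st p => (g1 st.1 p, g2 st.2.1 p, g3 st.2.2 p)) (s1, s2, s3) =
        (L.foldl g1 s1, L.foldl g2 s2, L.foldl g3 s3) := by
  intro L
  induction L with
  | nil => intro s1 s2 s3; rfl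
  | cons a L ih => intro s1 s2 s3; simp [List.foldl_cons, ih]

-- contents of one inverted-index bucket
theorem pvBucket (k : pvCell → Int) :
    ∀ (L : List (Int × pvCell)) (d : PySem.Dict Int (List Int)) (v : Int),
      (L.foldl (fun d p => d.modify (k p.2) [] (· ++ [p.1])) d).getD v [] =
        d.getD v [] ++ (L.filter (fun p => k p.2 == v)).map (·.1) := by
  intro L
  induction L with
  | nil => intro d v; simp
  | cons a L ih =>
    intro d v
    by_cases h : k a.2 = v
    · subst h
      simp only [List.foldl_cons, List.filter_cons, BEq.rfl, ih]
      rw [PySem.Dict.getD_modify_self]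
      simp
    · simp only [List.foldl_cons, List.filter_cons, ih]
      rw [PySem.Dict.getD_modify_of_ne]
      · simp [h]
      · exact fun hh => h hh.symm

-- the sorted deduplicated union of the three buckets is the increasing list of unit-sharing indices ≠ c
theorem pvSortedCand (xs : List pvCell) (c : Nat) :
    PySem.List.sorted
      (PySem.Set.discard
        (PySem.Set.ofList
          (((PySem.List.enumerate xs).filter (fun p => p.2.2.1 == (xs.getD c pvCellD).2.1)).map (·.1) ++
           ((PySem.List.enumerate xs).filter (fun p => p.2.2.2.1 == (xs.getD c pvCellD).2.2.1)).map (·.1) ++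
           ((PySem.List.enumerate xs).filter (fun p => p.2.2.2.2 == (xs.getD c pvCellD).2.2.2)).map (·.1)))
        ((c : Int)))
      (fun x => x) false =
    ((List.range xs.length).filter (fun c2 => !decide (c2 = c) && pvU (xs.getD c pvCellD) (xs.getD c2 pvCellD))).map
      (fun c2 => ((c2 : Nat) : Int)) := by
  have hpair : (((List.range xs.length).filter
      (fun c2 => !decide (c2 = c) && pvU (xs.getD c pvCellD) (xs.getD c2 pvCellD))).map
      (fun c2 => ((c2 : Nat) : Int))).Pairwise (fun a b => a < b) := by
    refine List.Pairwise.map _ ?_ ((List.pairwise_lt_range).filter _)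
    intro a b h; exact_mod_cast h
  apply PySem.List.sorted_eq_of_perm_of_pairwise_lt
  · apply List.perm_of_nodup_nodup_toFinset_eq
    · exact hpair.imp (fun h => ne_of_lt h)
    · exact PySem.Set.nodup_discard _ _ (PySem.Set.nodup_ofList _)
    · apply Finset.ext
      intro x
      simp only [List.mem_toFinset, List.mem_map, List.mem_filter, List.mem_range,
        PySem.Set.mem_discard, PySem.Set.mem_ofList, List.mem_append,
        PySem.List.mem_enumerate_iff, Bool.and_eq_true, Bool.not_eq_true', decide_eq_false_iff_not,
        pvU, Bool.or_eq_true, beq_iff_eq]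
      constructor
      · rintro ⟨k, ⟨hk, hkc, hor⟩, rfl⟩
        refine ⟨?_, by simpa using fun h => hkc (Nat.cast_injective h)⟩
        rcases hor with h | h
        rcases h with h | h
        · exact Or.inl (Or.inl ⟨(0 + (k : Int), xs.getD k pvCellD), ⟨⟨k, hk, by simp [List.getD_eq_getElem?_getD, hk]⟩, by exact h.symm⟩, by simp⟩)
        · exact Or.inl (Or.inr ⟨(0 + (k : Int), xs.getD k pvCellD), ⟨⟨k, hk, by simp [List.getD_eq_getElem?_getD, hk]⟩, by exact h.symm⟩, by simp⟩)
        · exact Or.inr ⟨(0 + (k : Int), xs.getD k pvCellD), ⟨⟨k, hk, by simp [List.getD_eq_getElem?_getD, hk]⟩, by exact h.symm⟩, by simp⟩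
      · rintro ⟨hor, hxc⟩
        have : ∃ k, k < xs.length ∧ x = (k : Int) ∧
            (xs.getD c pvCellD).2.1 = (xs.getD k pvCellD).2.1 ∨ k < xs.length ∧ x = (k : Int) ∧
            (xs.getD c pvCellD).2.2.1 = (xs.getD k pvCellD).2.2.1 ∨ k < xs.length ∧ x = (k : Int) ∧
            (xs.getD c pvCellD).2.2.2 = (xs.getD k pvCellD).2.2.2 := by
          rcases hor with (⟨p, ⟨⟨k, hk, rfl⟩, hkey⟩, rfl⟩ | ⟨p, ⟨⟨k, hk, rfl⟩, hkey⟩, rfl⟩) | ⟨p, ⟨⟨k, hk, rfl⟩, hkey⟩, rfl⟩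
          · exact ⟨k, Or.inl ⟨hk, by simp, by simpa [List.getD_eq_getElem?_getD, hk] using hkey.symm⟩⟩
          · exact ⟨k, Or.inr (Or.inl ⟨hk, by simp, by simpa [List.getD_eq_getElem?_getD, hk] using hkey.symm⟩)⟩
          · exact ⟨k, Or.inr (Or.inr ⟨hk, by simp, by simpa [List.getD_eq_getElem?_getD, hk] using hkey.symm⟩)⟩
        obtain ⟨k, hcase⟩ := this
        rcases hcase with ⟨hk, rfl, h⟩ | ⟨hk, rfl, h⟩ | ⟨hk, rfl, h⟩
        · exact ⟨k, ⟨hk, fun hh => hxc (by simp [hh]), Or.inl (Or.inl h)⟩, rfl⟩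
        · exact ⟨k, ⟨hk, fun hh => hxc (by simp [hh]), Or.inl (Or.inr h)⟩, rfl⟩
        · exact ⟨k, ⟨hk, fun hh => hxc (by simp [hh]), Or.inr h⟩, rfl⟩
  · exact hpair

-- B's index-building fold and B's code, restated with the proof abbreviations
def pvIdx (xs : List pvCell) :
    PySem.Dict Int (List Int) × PySem.Dict Int (List Int) × PySem.Dict Int (List Int) :=
  (PySem.List.enumerate xs).foldl
    (fun st p =>
      (st.1.modify p.2.2.1 [] (· ++ [p.1]),
       st.2.1.modify p.2.2.2.1 [] (· ++ [p.1]),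
       st.2.2.modify p.2.2.2.2 [] (· ++ [p.1])))
    (PySem.Dict.empty, PySem.Dict.empty, PySem.Dict.empty)

theorem pvB_eq (xs : List pvCell) : NT_chains_alt xs =
    (PySem.List.enumerate xs).map (fun p =>
      (PySem.List.sorted
        (PySem.Set.discard
          (PySem.Set.ofList
            ((pvIdx xs).1.getD p.2.2.1 [] ++ (pvIdx xs).2.1.getD p.2.2.2.1 [] ++ (pvIdx xs).2.2.getD p.2.2.2.2 []))
          p.1)
        (fun x => x) false).foldl
        (fun avail c2 =>
          if pvC p.2 (PySem.List.pyGetD xs c2 pvCellD) then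
            avail ++ [pvT p.2 (PySem.List.pyGetD xs c2 pvCellD) c2]
          else avail) []) := rfl

theorem pvMain (xs : List pvCell) : NT_chains xs = NT_chains_alt xs := by
  have hidx : pvIdx xs =
      ((PySem.List.enumerate xs).foldl (fun d p => d.modify ((fun cell : pvCell => cell.2.1) p.2) [] (· ++ [p.1])) PySem.Dict.empty,
       (PySem.List.enumerate xs).foldl (fun d p => d.modify ((fun cell : pvCell => cell.2.2.1) p.2) [] (· ++ [p.1])) PySem.Dict.empty,
       (PySem.List.enumerate xs).foldl (fun d p => d.modify ((fun cell : pvCell => cell.2.2.2) p.2) [] (· ++ [p.1])) PySem.Dict.empty) := by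
    unfold pvIdx
    exact pvFold3
      (fun (d : PySem.Dict Int (List Int)) (p : Int × pvCell) => d.modify ((fun cell : pvCell => cell.2.1) p.2) [] (· ++ [p.1]))
      (fun (d : PySem.Dict Int (List Int)) (p : Int × pvCell) => d.modify ((fun cell : pvCell => cell.2.2.1) p.2) [] (· ++ [p.1]))
      (fun (d : PySem.Dict Int (List Int)) (p : Int × pvCell) => d.modify ((fun cell : pvCell => cell.2.2.2) p.2) [] (· ++ [p.1]))
      (PySem.List.enumerate xs) _ _ _
  rw [pvA_eq, pvB_eq, hidx]
  apply List.ext_getElem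
  · simp [PySem.List.length_enumerate]
  intro i hi hi2
  have hin : i < xs.length := by simpa using hi
  simp only [List.getElem_map, List.getElem_range, PySem.List.getElem_enumerate]
  rw [pvA_inner xs (xs.getD i pvCellD) i (List.range xs.length) [((i : Int))] []
      (List.nodup_range) (by intro x hx; simp [eq_comm])]
  rw [pvBucket (fun cell : pvCell => cell.2.1), pvBucket (fun cell : pvCell => cell.2.2.1),
      pvBucket (fun cell : pvCell => cell.2.2.2)]
  simp only [PySem.Dict.getD_empty, List.nil_append, zero_add, ← List.getD_eq_getElem xs pvCellD hin]
  rw [pvSortedCand xs i, PySem.List.foldl_append_if, List.filter_map, List.map_map]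
  rw [List.nil_append, List.filter_filter]
  refine congrArg₂ _ ?_ ?_
  · funext c2
    simp [Function.comp, PySem.List.pyGetD_natCast]
  · apply List.filter_congr
    intro x hx
    simp only [Function.comp, PySem.List.pyGetD_natCast]
    ac_rfl

-- ===== VERDICT =====
theorem NT_chains_spec : Claim_equal_NT_chains := by
  unfold Claim_equal_NT_chains
  intro xs _ _
  unfold Spec_NT_chains
  exact pvMain xs
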